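-- pv_equiv track=rewrite | github.com/nathangriotUA/Steganography | main.py | text_to_bin
-- ===== SOURCE A (Python) =====
-- def text_to_bin(text):
--     ''' convert text into arrays of bins:
--         Input:
--             - text (str)
--         Ouput:
--             - Binary arrays
--     '''
--     # EOM (END OF MESSAGE) signals that it's the end of the message
--     chars = bytearray(text+"EOM", "utf8")
--     bins = []
--
--     for char in chars:
--         bin_char = bin(char)[2:].zfill(8)
--         bin_char = list(bin_char)
--         bins += bin_char
--
--     return bins
-- ===== SOURCE B (Python) =====
-- def text_to_bin(text):
--     ''' convert text into arrays of bins (big-int + direct bit tests, no per-byte formatting) '''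
--     chars = bytearray(text + "EOM", "utf8")
--     n = int.from_bytes(chars, "big")
--     nbits = 8 * len(chars)
--     return ['1' if (n >> (nbits - 1 - i)) & 1 else '0' for i in range(nbits)]
-- ===== Notes on version B (the rewrite author's own statement) =====
-- stated objective: alternative
-- what changed: Eliminates A's per-byte bin()/zfill/list loop entirely: the whole utf8 byte sequence is turned into one big integer with int.from_bytes and each output bit is read directly by shifting and masking that integer, so there is no string formatting or list concatenation at all.
import Mathlib
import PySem

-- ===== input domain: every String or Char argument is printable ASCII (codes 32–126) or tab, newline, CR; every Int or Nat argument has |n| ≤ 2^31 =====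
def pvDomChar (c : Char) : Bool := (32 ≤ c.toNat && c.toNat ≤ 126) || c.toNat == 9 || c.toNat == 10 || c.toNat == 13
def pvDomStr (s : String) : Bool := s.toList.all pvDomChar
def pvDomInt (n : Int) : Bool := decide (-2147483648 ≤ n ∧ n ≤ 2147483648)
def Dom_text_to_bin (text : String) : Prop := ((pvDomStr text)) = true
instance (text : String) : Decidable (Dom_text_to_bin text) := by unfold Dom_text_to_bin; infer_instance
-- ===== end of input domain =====

-- B drops A's per-byte bin()/zfill formatting loop: it turns the whole utf8 byte sequence into
-- one big integer and reads every output bit directly by shift-and-mask; objective: alternative.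
-- The utf8 byte sequence of text+"EOM" is ported as the character codes, exact on the ASCII domain Dom_text_to_bin.

-- ===== PORT A =====
-- Python str.zfill(w) on a list of chars (no sign handling needed: inputs are binary digits)
def zfillC (w : Nat) (l : List Char) : List Char := List.replicate (w - l.length) '0' ++ l

-- bin(n)[2:] for n > 0 (Python's bin via repeated division, MSB first); binGo 0 = []
def binGo (n : Nat) : List Char :=
  if _h : n = 0 then []
  else binGo (n / 2) ++ [if n % 2 = 1 then '1' else '0']
decreasing_by exact Nat.div_lt_self (Nat.pos_of_ne_zero _h) (by norm_num)

-- bin(n)[2:] exactly (bin(0)[2:] = "0")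
def pyBin (n : Nat) : List Char := if n = 0 then ['0'] else binGo n

def text_to_bin (text : String) : List String :=
  let chars := (text ++ "EOM").toList      -- utf8 bytes = char codes on the ASCII domain
  chars.foldl
    (fun bins c =>
      bins ++ (zfillC 8 (pyBin c.toNat)).map (fun ch => String.mk [ch]))
    []

-- ===== PORT B =====
def text_to_bin_alt (text : String) : List String :=
  let chars := (text ++ "EOM").toList      -- utf8 bytes = char codes on the ASCII domain
  let n := chars.foldl (fun a c => a * 256 + c.toNat) 0      -- int.from_bytes(chars, "big")
  let nbits := 8 * chars.length
  (List.range nbits).map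
    (fun i => if (n >>> (nbits - 1 - i)) % 2 = 1 then "1" else "0")   -- (n >> s) & 1

-- ===== PRECONDITION & SPEC =====
def Spec_text_to_bin (text : String) (out : List String) : Prop := out = text_to_bin_alt text
instance (text : String) (out : List String) : Decidable (Spec_text_to_bin text out) := by unfold Spec_text_to_bin; infer_instance

-- ===== CLAIM (what is proved, stated in full; the proofs are below) =====
def Claim_equal_text_to_bin : Prop := ∀ (text : String), Dom_text_to_bin text → Spec_text_to_bin text (text_to_bin text)

-- ===== LEMMAS AND PROOFS =====

-- big-endian binary of n zero-padded to width w (spec value both sides reduce to)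
def natBitsPad : Nat → Nat → List Char
  | 0, _ => []
  | w + 1, n => natBitsPad w (n / 2) ++ [if n % 2 = 1 then '1' else '0']

theorem natBitsPad_zero (w : Nat) : natBitsPad w 0 = List.replicate w '0' := by
  induction w with
  | zero => rfl
  | succ w ih => simp [natBitsPad, ih, List.replicate_succ']

theorem zfill_binGo (w : Nat) : ∀ n, n < 2 ^ w → zfillC w (binGo n) = natBitsPad w n := by
  induction w with
  | zero =>
    intro n hn
    interval_cases n
    simp [zfillC, binGo, natBitsPad]
  | succ w ih =>
    intro n hn
    by_cases h0 : n = 0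
    · subst h0
      simp [zfillC, binGo, natBitsPad_zero]
    · rw [binGo, dif_neg h0]
      have hlen : (binGo (n / 2) ++ [if n % 2 = 1 then '1' else '0']).length
          = (binGo (n / 2)).length + 1 := by simp
      have hdiv : n / 2 < 2 ^ w := by
        have : 2 ^ (w + 1) = 2 * 2 ^ w := by ring
        omega
      have := ih (n / 2) hdiv
      unfold zfillC at this ⊢
      rw [hlen]
      have hsub : w + 1 - ((binGo (n / 2)).length + 1) = w - (binGo (n / 2)).length := by omega
      rw [hsub, natBitsPad, ← this]
      simp

theorem zfill_pyBin (w n : Nat) (hw : 1 ≤ w) (hn : n < 2 ^ w) :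
    zfillC w (pyBin n) = natBitsPad w n := by
  by_cases h0 : n = 0
  · subst h0
    unfold pyBin zfillC
    rw [if_pos rfl, natBitsPad_zero]
    have : w = (w - 1) + 1 := by omega
    rw [this]
    simp [List.replicate_succ']
  · rw [pyBin, if_neg h0]
    exact zfill_binGo w n hn

theorem natBitsPad_split (w2 : Nat) : ∀ w1 a b, b < 2 ^ w2 →
    natBitsPad (w1 + w2) (a * 2 ^ w2 + b) = natBitsPad w1 a ++ natBitsPad w2 b := by
  induction w2 with
  | zero => intro w1 a b hb; interval_cases b; simp [natBitsPad]
  | succ w2 ih =>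
    intro w1 a b hb
    have hX : a * 2 ^ (w2 + 1) + b = b + 2 * (a * 2 ^ w2) := by ring
    have hdiv : (a * 2 ^ (w2 + 1) + b) / 2 = a * 2 ^ w2 + b / 2 := by
      rw [hX, Nat.add_mul_div_left _ _ (by norm_num)]; omega
    have hmod : (a * 2 ^ (w2 + 1) + b) % 2 = b % 2 := by
      rw [hX, Nat.add_mul_mod_self_left]
    have hb2 : b / 2 < 2 ^ w2 := by
      have : 2 ^ (w2 + 1) = 2 * 2 ^ w2 := by ring
      omega
    show natBitsPad (w1 + w2 + 1) _ = _
    rw [natBitsPad, hdiv, hmod, ih w1 a (b / 2) hb2]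
    rw [natBitsPad]
    simp

theorem natBitsPad_foldl (bs : List Nat) : ∀ (w a : Nat), (∀ b ∈ bs, b < 256) → a < 2 ^ w →
    natBitsPad (w + 8 * bs.length) (bs.foldl (fun x b => x * 256 + b) a)
      = natBitsPad w a ++ bs.flatMap (fun b => natBitsPad 8 b) := by
  induction bs with
  | nil => intro w a _ _; simp
  | cons b bs ih =>
    intro w a hlt ha
    have hb : b < 256 := hlt b (List.mem_cons_self ..)
    have hpow : 2 ^ (w + 8) = 2 ^ w * 256 := by rw [pow_add]; norm_num
    have ha' : a * 256 + b < 2 ^ (w + 8) := by omega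
    have harr : w + 8 * (b :: bs).length = (w + 8) + 8 * bs.length := by
      simp [List.length_cons]; ring
    rw [List.foldl_cons, harr, ih (w + 8) (a * 256 + b)
          (fun x hx => hlt x (List.mem_cons_of_mem _ hx)) ha']
    have hsplit : natBitsPad (w + 8) (a * 256 + b) = natBitsPad w a ++ natBitsPad 8 b := by
      have h256 : (256 : Nat) = 2 ^ 8 := by norm_num
      rw [h256] at hb ⊢
      exact natBitsPad_split 8 w a b hb
    rw [hsplit]
    simp

-- natBitsPad is, position by position, the shift-and-mask bit test B performs
theorem natBitsPad_eq_range (w : Nat) : ∀ n, natBitsPad w n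
    = (List.range w).map (fun i => if n / 2 ^ (w - 1 - i) % 2 = 1 then '1' else '0') := by
  induction w with
  | zero => intro n; rfl
  | succ w ih =>
    intro n
    rw [natBitsPad, ih (n / 2), List.range_succ, List.map_append]
    congr 1
    · apply List.map_congr_left
      intro i hi
      have hiw : i < w := List.mem_range.mp hi
      have hexp : w + 1 - 1 - i = (w - 1 - i) + 1 := by omega
      rw [hexp, pow_succ', Nat.div_div_eq_div_mul]
    · simp

-- ===== VERDICT (by name: the statement is the Claim_ definition above) =====
theorem text_to_bin_spec : Claim_equal_text_to_bin := by
  intro text hdom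
  unfold Spec_text_to_bin text_to_bin text_to_bin_alt
  simp only []
  set chars := (text ++ "EOM").toList with hchars
  have hlt : ∀ c ∈ chars, c.toNat < 256 := by
    intro c hc
    rw [hchars, String.toList_append] at hc
    rcases List.mem_append.mp hc with h | h
    · have := List.all_eq_true.mp hdom c h
      unfold pvDomChar at this
      simp at this
      omega
    · fin_cases h <;> decide
  have hbytes : ∀ b ∈ chars.map Char.toNat, b < 256 := by
    intro b hb; rcases List.mem_map.mp hb with ⟨c, hc, rfl⟩; exact hlt c hc
  have hn : chars.foldl (fun a c => a * 256 + c.toNat) 0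
      = (chars.map Char.toNat).foldl (fun x b => x * 256 + b) 0 := by
    rw [List.foldl_map]
  -- A side: loop = flatMap, then zfill(bin …) = natBitsPad 8 per byte, then glue to one natBitsPad
  have hA : chars.foldl
      (fun bins c => bins ++ (zfillC 8 (pyBin c.toNat)).map (fun ch => String.mk [ch])) []
      = [] ++ chars.flatMap (fun c => (zfillC 8 (pyBin c.toNat)).map (fun ch => String.mk [ch])) :=
    PySem.List.foldl_append_eq_flatMap _ chars []
  rw [hA, List.nil_append]
  have hper : ∀ c ∈ chars,
      (zfillC 8 (pyBin c.toNat)).map (fun ch => String.mk [ch])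
        = (natBitsPad 8 c.toNat).map (fun ch => String.mk [ch]) := by
    intro c hc
    rw [zfill_pyBin 8 c.toNat (by norm_num) (by have := hlt c hc; norm_num; omega)]
  have hcat : natBitsPad (8 * chars.length) ((chars.map Char.toNat).foldl (fun x b => x * 256 + b) 0)
      = (chars.map Char.toNat).flatMap (fun b => natBitsPad 8 b) := by
    have := natBitsPad_foldl (chars.map Char.toNat) 0 0 hbytes (by norm_num)
    simpa using this
  have hAside : chars.flatMap (fun c => (zfillC 8 (pyBin c.toNat)).map (fun ch => String.mk [ch]))
      = (natBitsPad (8 * chars.length) (chars.foldl (fun a c => a * 256 + c.toNat) 0)).map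
          (fun ch => String.mk [ch]) := by
    calc chars.flatMap (fun c => (zfillC 8 (pyBin c.toNat)).map (fun ch => String.mk [ch]))
        = chars.flatMap (fun c => (natBitsPad 8 c.toNat).map (fun ch => String.mk [ch])) :=
          List.flatMap_congr hper
      _ = (chars.flatMap (fun c => natBitsPad 8 c.toNat)).map (fun ch => String.mk [ch]) := by
          rw [List.map_flatMap]
      _ = _ := by rw [hn, hcat, List.flatMap_map]
  rw [hAside]
  -- B side: shift-and-mask over range = natBitsPad mapped to strings
  rw [natBitsPad_eq_range, List.map_map]
  apply List.map_congr_left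
  intro i _
  simp only [Function.comp, Nat.shiftRight_eq_div_pow]
  split_ifs <;> rfl
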